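-- pv_equiv track=rewrite | github.com/denisa2904/Python-Lab | Lab2/ex9.py | spectators
-- ===== SOURCE A (Python) =====
-- def spectators(matrix):
--     shorties = []
--     for j in range(len(matrix[0])):
--         for i in range(1, len(matrix)):
--             for k in range(0, i):
--                 if matrix[i][j] <= matrix[k][j]:
--                     shorties.append([i, j])
--                     break
--     return shorties
-- ===== SOURCE B (Python) =====
-- def spectators(matrix):
--     blocked = []
--     for j in range(len(matrix[0])):
--         best = matrix[0][j]
--         for i in range(1, len(matrix)):
--             v = matrix[i][j]
--             if v <= best:
--                 blocked.append([i, j])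
--             else:
--                 best = v
--     return blocked
-- ===== Notes on version B (the rewrite author's own statement) =====
-- stated objective: faster
-- what changed: Replaces the inner scan over all earlier rows (per row, per column) by a running prefix maximum per column, so each cell is inspected once.
import Mathlib
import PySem

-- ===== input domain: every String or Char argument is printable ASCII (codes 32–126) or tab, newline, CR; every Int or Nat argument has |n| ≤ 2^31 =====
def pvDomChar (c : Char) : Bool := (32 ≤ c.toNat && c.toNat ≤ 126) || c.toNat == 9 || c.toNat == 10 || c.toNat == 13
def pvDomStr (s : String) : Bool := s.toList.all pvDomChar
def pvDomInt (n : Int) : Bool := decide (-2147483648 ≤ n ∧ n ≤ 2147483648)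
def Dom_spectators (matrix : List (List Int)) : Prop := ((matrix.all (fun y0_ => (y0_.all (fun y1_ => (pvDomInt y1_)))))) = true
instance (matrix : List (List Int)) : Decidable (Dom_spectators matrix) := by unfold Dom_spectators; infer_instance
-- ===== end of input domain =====

-- B replaces A's inner scan over all earlier rows by a running prefix maximum per column (O(rows*cols) instead of O(rows^2*cols)).

-- ===== PORT A =====
-- matrix[i][j]; in range on every access admitted by Pre_spectators
def pvGet (matrix : List (List Int)) (i j : Int) : Int :=
  PySem.List.pyGetD (PySem.List.pyGetD matrix i []) j 0

-- the inner 'for k in range(0, i): if …: append; break' loop: does some earlier row block row i?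
def pvAnyTaller (matrix : List (List Int)) (i j : Int) : List Int → Bool
  | [] => false
  | k :: ks => if pvGet matrix i j ≤ pvGet matrix k j then true else pvAnyTaller matrix i j ks

def spectators (matrix : List (List Int)) : List (List Int) :=
  (PySem.List.pyRange 0 ((matrix.headD []).length : Int) 1).foldl
    (fun shorties j =>
      (PySem.List.pyRange 1 (matrix.length : Int) 1).foldl
        (fun shorties i =>
          if pvAnyTaller matrix i j (PySem.List.pyRange 0 i 1) then shorties ++ [[i, j]]
          else shorties)
        shorties)
    []

-- ===== PORT B =====
def spectators_alt (matrix : List (List Int)) : List (List Int) :=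
  (PySem.List.pyRange 0 ((matrix.headD []).length : Int) 1).foldl
    (fun blocked j =>
      ((PySem.List.pyRange 1 (matrix.length : Int) 1).foldl
        (fun (st : List (List Int) × Int) i =>
          let v := pvGet matrix i j
          if v ≤ st.2 then (st.1 ++ [[i, j]], st.2) else (st.1, v))
        (blocked, pvGet matrix 0 j)).1)
    []

-- ===== PRECONDITION & SPEC =====
-- Python A indexes matrix[0] and matrix[i][j] for every row i and every j < len(matrix[0]):
-- Pre_ excludes exactly the inputs where that raises (empty matrix, or a row shorter than the first).
def Pre_spectators (matrix : List (List Int)) : Prop :=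
  matrix ≠ [] ∧ ∀ row ∈ matrix, (matrix.headD []).length ≤ row.length
instance (matrix : List (List Int)) : Decidable (Pre_spectators matrix) := by
  unfold Pre_spectators; infer_instance
def pvWitness_spectators : List (List Int) := [[3, 1], [2, 5], [4, 0]]
def Spec_spectators (matrix : List (List Int)) (out : List (List Int)) : Prop := out = spectators_alt matrix
instance (matrix : List (List Int)) (out : List (List Int)) : Decidable (Spec_spectators matrix out) := by unfold Spec_spectators; infer_instance

-- ===== CLAIM (what is proved, stated in full; the proofs are below) =====
def Claim_equal_spectators : Prop := ∀ (matrix : List (List Int)), Dom_spectators matrix → Pre_spectators matrix → Spec_spectators matrix (spectators matrix)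

-- ===== LEMMAS AND PROOFS =====

-- running maximum of column j over rows 0..m (B's 'best' after processing row m)
def colMax (matrix : List (List Int)) (j : Int) : Nat → Int
  | 0 => pvGet matrix 0 j
  | m + 1 =>
    if pvGet matrix ((m : Int) + 1) j ≤ colMax matrix j m then colMax matrix j m
    else pvGet matrix ((m : Int) + 1) j

lemma pvAnyTaller_eq_any (matrix : List (List Int)) (i j : Int) (ks : List Int) :
    pvAnyTaller matrix i j ks = ks.any (fun k => decide (pvGet matrix i j ≤ pvGet matrix k j)) := by
  induction ks with
  | nil => rfl
  | cons k ks ih =>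
    simp only [pvAnyTaller, List.any_cons, ih]
    by_cases h : pvGet matrix i j ≤ pvGet matrix k j <;> simp [h]

lemma any_eq_le_colMax (matrix : List (List Int)) (j v : Int) (m : Nat) :
    (PySem.List.pyRange 0 ((m : Int) + 1) 1).any
        (fun k => decide (v ≤ pvGet matrix k j)) = decide (v ≤ colMax matrix j m) := by
  induction m with
  | zero =>
    rw [show ((0 : Nat) : Int) + 1 = 0 + 1 by norm_num, PySem.List.pyRange_one_singleton]
    simp [colMax]
  | succ m ih =>
    rw [show ((m + 1 : Nat) : Int) + 1 = (((m : Nat) : Int) + 1) + 1 by push_cast; ring,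
        PySem.List.pyRange_one_succ_right (by omega)]
    simp only [List.any_append, List.any_cons, List.any_nil, ih]
    simp only [colMax]
    by_cases h1 : v ≤ colMax matrix j m <;>
      by_cases h2 : pvGet matrix ((m : Int) + 1) j ≤ colMax matrix j m <;>
      by_cases h3 : v ≤ pvGet matrix ((m : Int) + 1) j <;>
      simp [h1, h2, h3] <;> omega

-- the two inner (per-column) loops over rows 1..m agree; B additionally carries the running maximum
lemma col_loop (matrix : List (List Int)) (j : Int) (m : Nat) (res : List (List Int)) :
    (PySem.List.pyRange 1 ((m : Int) + 1) 1).foldl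
        (fun (st : List (List Int) × Int) i =>
          let v := pvGet matrix i j
          if v ≤ st.2 then (st.1 ++ [[i, j]], st.2) else (st.1, v))
        (res, pvGet matrix 0 j) =
      ((PySem.List.pyRange 1 ((m : Int) + 1) 1).foldl
        (fun res i =>
          if pvAnyTaller matrix i j (PySem.List.pyRange 0 i 1) then res ++ [[i, j]]
          else res)
        res, colMax matrix j m) := by
  induction m with
  | zero =>
    rw [show ((0 : Nat) : Int) + 1 = 1 by norm_num, PySem.List.pyRange_one_eq_nil le_rfl]
    simp [colMax]
  | succ m ih =>
    rw [show ((m + 1 : Nat) : Int) + 1 = (((m : Nat) : Int) + 1) + 1 by push_cast; ring,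
        PySem.List.pyRange_one_succ_right (by omega)]
    simp only [List.foldl_append, List.foldl_cons, List.foldl_nil, ih]
    have hc : pvAnyTaller matrix ((m : Int) + 1) j
        (PySem.List.pyRange 0 ((m : Int) + 1) 1) =
        decide (pvGet matrix ((m : Int) + 1) j ≤ colMax matrix j m) := by
      rw [pvAnyTaller_eq_any, any_eq_le_colMax]
    simp only [colMax]
    by_cases h : pvGet matrix ((m : Int) + 1) j ≤ colMax matrix j m <;>
      simp [hc, h]

-- ===== VERDICT (by name: the statement is the Claim_ definition above) =====
theorem spectators_spec : Claim_equal_spectators := by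
  intro matrix _ _
  unfold Spec_spectators spectators spectators_alt
  rcases matrix with _ | ⟨r, rs⟩
  · rfl
  · refine (List.foldl_ext _ _ _ ?_).symm
    intro blocked j _
    have hlen : (((r :: rs).length : Int)) = ((rs.length : Int) + 1) := by
      push_cast [List.length_cons]; ring
    rw [hlen, col_loop]
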